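-- pv_equiv track=rewrite | github.com/sDaCoder/iitm_python | oppe1_set2/problem1.py | is_odd_indices_alpha_and_even_indices_digits
-- ===== SOURCE A (Python) =====
-- def is_odd_indices_alpha_and_even_indices_digits(string: str) -> bool:
--     '''
--     Given a string, check if all the odd indices are alphabets and the even indices are digits.
--
--     Note: indices starts from 0.
--
--     Arguments:
--     string: str - the input string
--
--     Return:
--     bool - True if all odd indices are alphabets and even indices are digits, else False
--     '''
--     for i in range(len(string)):
--         if i % 2 == 1:
--             if string[i].isalpha() == False:
--                 return False
--         else:
--             if string[i].isdigit() == False: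
--                 return False
--     return True
-- ===== SOURCE B (Python) =====
-- def is_odd_indices_alpha_and_even_indices_digits(string: str) -> bool:
--     '''
--     Check that every even-index character is a digit and every odd-index
--     character is alphabetic, by splitting the string into its two parity
--     subsequences with slices and testing each uniformly.
--     '''
--     return (all(c.isdigit() for c in string[::2])
--             and all(c.isalpha() for c in string[1::2]))
-- ===== Notes on version B (the rewrite author's own statement) =====
-- stated objective: simpler
-- what changed: Replaces the index loop with parity branching and early returns by two uniform slice passes: all even-index chars (string[::2]) must be digits and all odd-index chars (string[1::2]) alphabetic.
import Mathlib
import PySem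

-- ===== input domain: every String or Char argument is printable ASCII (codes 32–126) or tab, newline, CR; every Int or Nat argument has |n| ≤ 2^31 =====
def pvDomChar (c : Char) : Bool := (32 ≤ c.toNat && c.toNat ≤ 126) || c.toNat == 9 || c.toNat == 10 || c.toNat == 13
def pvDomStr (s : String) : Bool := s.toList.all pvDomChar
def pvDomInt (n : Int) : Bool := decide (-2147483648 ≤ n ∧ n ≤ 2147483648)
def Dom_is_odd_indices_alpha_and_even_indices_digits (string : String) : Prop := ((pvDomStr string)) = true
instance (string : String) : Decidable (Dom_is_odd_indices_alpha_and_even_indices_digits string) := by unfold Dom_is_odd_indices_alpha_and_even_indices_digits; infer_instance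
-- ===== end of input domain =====

-- B replaces A's parity-branched index loop (with early returns) by two uniform
-- passes over the parity subsequences string[::2] and string[1::2]; objective: simpler.

-- ===== PORT A =====
-- the 'for i in range(len(string))' loop with its early 'return False's, as
-- structural recursion over the index list; string[i] is always in range, so
-- pyGetD's default is never read
def pvLoopA (cs : List Char) : List Int → Bool
  | [] => true
  | i :: rest =>
    if PySem.Int.mod i 2 == 1 then
      if PySem.Chars.isalpha (PySem.List.pyGetD cs i ' ') == false then false
      else pvLoopA cs rest
    else
      if PySem.Chars.isdigit (PySem.List.pyGetD cs i ' ') == false then false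
      else pvLoopA cs rest

def is_odd_indices_alpha_and_even_indices_digits (string : String) : Bool :=
  pvLoopA string.toList (PySem.List.pyRange 0 (PySem.Str.len string) 1)

-- ===== PORT B =====
def is_odd_indices_alpha_and_even_indices_digits_alt (string : String) : Bool :=
  -- string[::2] and string[1::2]; step 2 ≠ 0, so slice? always returns a value
  ((PySem.List.slice? string.toList none none 2).getD []).all PySem.Chars.isdigit
    && ((PySem.List.slice? string.toList (some 1) none 2).getD []).all PySem.Chars.isalpha

-- ===== PRECONDITION & SPEC =====
def Spec_is_odd_indices_alpha_and_even_indices_digits (string : String) (out : Bool) : Prop := out = is_odd_indices_alpha_and_even_indices_digits_alt string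
instance (string : String) (out : Bool) : Decidable (Spec_is_odd_indices_alpha_and_even_indices_digits string out) := by unfold Spec_is_odd_indices_alpha_and_even_indices_digits; infer_instance

-- ===== CLAIM (what is proved, stated in full; the proofs are below) =====
def Claim_equal_is_odd_indices_alpha_and_even_indices_digits : Prop := ∀ (string : String), Dom_is_odd_indices_alpha_and_even_indices_digits string → Spec_is_odd_indices_alpha_and_even_indices_digits string (is_odd_indices_alpha_and_even_indices_digits string)

-- ===== LEMMAS AND PROOFS =====

-- every other element, starting at the head (what string[::2] selects)
def pvStep2 {α : Type} : List α → List α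
  | [] => []
  | [a] => [a]
  | a :: _ :: r => a :: pvStep2 r

theorem pvStep2_cons {α : Type} (d : α) (r : List α) :
    pvStep2 (d :: r) = d :: pvStep2 r.tail := by
  cases r <;> simp [pvStep2]

-- interleaved recursive characterisation both ports are reduced to
def pvCheck : List Char → Bool
  | [] => true
  | [c] => PySem.Chars.isdigit c
  | c :: d :: r => PySem.Chars.isdigit c && PySem.Chars.isalpha d && pvCheck r

theorem pvCheck_eq_step2 (cs : List Char) :
    pvCheck cs = ((pvStep2 cs).all PySem.Chars.isdigit
                  && (pvStep2 cs.tail).all PySem.Chars.isalpha) := by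
  induction cs using pvCheck.induct with
  | case1 => simp [pvCheck, pvStep2]
  | case2 c => simp [pvCheck, pvStep2]
  | case3 c d r ih =>
    simp only [pvCheck, pvStep2, List.tail_cons, pvStep2_cons, List.all_cons, ih]
    cases PySem.Chars.isdigit c <;> cases PySem.Chars.isalpha d <;>
      cases (pvStep2 r).all PySem.Chars.isdigit <;> simp

-- the filterMap/range form slice? produces, for start 0 and step 2
theorem pvSlice2_core (cs : List Char) :
    (List.range (((cs.length : Int) + 1) / 2).toNat).filterMap
        (fun (k : Nat) => cs[(2 * (k : Int)).toNat]?) = pvStep2 cs := by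
  induction cs using pvStep2.induct with
  | case1 => simp [pvStep2]
  | case2 a => simp [pvStep2, List.range_succ]
  | case3 a b r ih =>
    have hcount : ((((a :: b :: r).length : Int) + 1) / 2).toNat
        = (((r.length : Int) + 1) / 2).toNat + 1 := by
      simp; omega
    rw [hcount, List.range_succ_eq_map, List.filterMap_cons, List.filterMap_map]
    have h0 : (a :: b :: r)[(2 * ((0 : Nat) : Int)).toNat]? = some a := by simp
    simp only [pvStep2, h0]
    refine congrArg (a :: ·) ?_
    rw [← ih]
    apply List.filterMap_congr
    intro k _
    have h2 : (2 * ((k + 1 : Nat) : Int)).toNat = (2 * (k : Int)).toNat + 2 := by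
      push_cast; omega
    simp only [Function.comp, h2]
    simp

theorem pvSlice_even (cs : List Char) :
    PySem.List.slice? cs none none 2 = some (pvStep2 cs) := by
  simp only [PySem.List.slice?, PySem.List.sliceIndices]
  norm_num
  have hc : (if 0 < cs.length then (((cs.length : Int) + 2 - 1) / 2).toNat else 0)
      = (((cs.length : Int) + 1) / 2).toNat := by
    split_ifs <;> omega
  rw [hc]
  exact pvSlice2_core cs

theorem pvSlice_odd (cs : List Char) :
    PySem.List.slice? cs (some 1) none 2 = some (pvStep2 cs.tail) := by
  cases cs with
  | nil => decide
  | cons c t =>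
    simp only [PySem.List.slice?, PySem.List.sliceIndices]
    norm_num
    have hc : (if 0 < t.length then (((t.length : Int) + 2 - 1) / 2).toNat else 0)
        = (((t.length : Int) + 1) / 2).toNat := by
      split_ifs <;> omega
    rw [hc, ← pvSlice2_core t]
    apply List.filterMap_congr
    intro k _
    have h1 : (1 + 2 * (k : Int)).toNat = (2 * (k : Int)).toNat + 1 := by omega
    simp [h1]

-- A's loop, started at an even index s, checks exactly pvCheck of the suffix
theorem pvLoopA_spec (cs : List Char) (s : Nat) (hs : s % 2 = 0) :
    pvLoopA cs (PySem.List.pyRange (s : Int) (cs.length : Int) 1) = pvCheck (cs.drop s) := by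
  by_cases h1 : cs.length ≤ s
  · rw [PySem.List.pyRange_one_eq_nil (by exact_mod_cast h1), List.drop_eq_nil_of_le h1]
    rfl
  · replace h1 : s < cs.length := by omega
    rw [PySem.List.pyRange_one_cons (by exact_mod_cast h1)]
    have hdrop : cs.drop s = cs[s] :: cs.drop (s + 1) := List.drop_eq_getElem_cons h1
    have hmod : PySem.Int.mod (s : Int) 2 = 0 := by
      have h := PySem.Int.mod_natCast s 2
      rw [hs] at h
      exact_mod_cast h
    have hget : PySem.List.pyGetD cs (s : Int) ' ' = cs[s] := by
      rw [PySem.List.pyGetD_natCast, List.getD_eq_getElem?_getD, List.getElem?_eq_getElem h1]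
      rfl
    by_cases h2 : cs.length ≤ s + 1
    · -- s is the last index
      have hlen : cs.length = s + 1 := by omega
      rw [show ((s : Int) + 1) = ((s + 1 : Nat) : Int) by push_cast; ring,
        PySem.List.pyRange_one_eq_nil (by exact_mod_cast h2)]
      have hdrop1 : cs.drop (s + 1) = [] := List.drop_eq_nil_of_le h2
      rw [hdrop, hdrop1]
      simp only [pvLoopA, pvCheck, hmod, hget]
      cases PySem.Chars.isdigit cs[s] <;> rfl
    · replace h2 : s + 1 < cs.length := by omega
      rw [show ((s : Int) + 1) = ((s + 1 : Nat) : Int) by push_cast; ring,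
        PySem.List.pyRange_one_cons (by exact_mod_cast h2)]
      have hmod1 : PySem.Int.mod ((s + 1 : Nat) : Int) 2 = 1 := by
        have hs1 : (s + 1) % 2 = 1 := by omega
        have h := PySem.Int.mod_natCast (s + 1) 2
        rw [hs1] at h
        exact_mod_cast h
      have hget1 : PySem.List.pyGetD cs ((s + 1 : Nat) : Int) ' ' = cs[s + 1] := by
        rw [PySem.List.pyGetD_natCast, List.getD_eq_getElem?_getD, List.getElem?_eq_getElem h2]
        rfl
      have ih := pvLoopA_spec cs (s + 2) (by omega)
      have hdrop1 : cs.drop (s + 1) = cs[s + 1] :: cs.drop (s + 2) := List.drop_eq_getElem_cons h2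
      rw [show (((s + 1 : Nat) : Int) + 1) = ((s + 2 : Nat) : Int) by push_cast; ring]
      rw [hdrop, hdrop1]
      simp only [pvLoopA, pvCheck, hmod, hmod1, hget, hget1, ih]
      cases PySem.Chars.isdigit cs[s] <;> cases PySem.Chars.isalpha cs[s + 1] <;> simp
termination_by cs.length - s

-- ===== VERDICT (by name: the statement is the Claim_ definition above) =====
theorem is_odd_indices_alpha_and_even_indices_digits_spec : Claim_equal_is_odd_indices_alpha_and_even_indices_digits := by
  intro s _
  unfold Spec_is_odd_indices_alpha_and_even_indices_digits
  unfold is_odd_indices_alpha_and_even_indices_digits is_odd_indices_alpha_and_even_indices_digits_alt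
  rw [pvSlice_even, pvSlice_odd]
  have h := pvLoopA_spec s.toList 0 rfl
  simp only [Int.natCast_zero, List.drop_zero, String.length_toList] at h
  simp [PySem.Str.len_eq, h, pvCheck_eq_step2]
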